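-- pv_equiv track=rewrite | github.com/postsai/postsai | backend/importer.py | filter_out_folders
-- ===== SOURCE A (Python) =====
-- def filter_out_folders(files):
--     """Sourceforge includes folders in the file list, but we do not want them"""
--
--     result = {}
--     for file_to_test, value in list(files.items()):
--         for file in list(files.keys()):
--             if file.find(file_to_test + "/") == 0:
--                 break
--         else:
--             result[file_to_test] = value
--     return result
-- ===== SOURCE B (Python) =====
-- def filter_out_folders(files):
--     """Sourceforge includes folders in the file list, but we do not want them"""
--
--     # Build, in one pass over all characters, the set of every "directory
--     # prefix" (the part before any '/') of any file name; a name is a folder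
--     # exactly when it is in that set.
--     folders = set()
--     for name in files:
--         prefix = ""
--         for ch in name:
--             if ch == "/":
--                 folders.add(prefix)
--             prefix += ch
--     return {k: v for k, v in files.items() if k not in folders}
-- ===== Notes on version B (the rewrite author's own statement) =====
-- stated objective: faster
-- what changed: Instead of scanning all keys for each key to test whether some key starts with key+'/', B makes one pass over all characters of all keys collecting the set of every prefix that ends just before a '/', then keeps exactly the keys not in that set.
import Mathlib
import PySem

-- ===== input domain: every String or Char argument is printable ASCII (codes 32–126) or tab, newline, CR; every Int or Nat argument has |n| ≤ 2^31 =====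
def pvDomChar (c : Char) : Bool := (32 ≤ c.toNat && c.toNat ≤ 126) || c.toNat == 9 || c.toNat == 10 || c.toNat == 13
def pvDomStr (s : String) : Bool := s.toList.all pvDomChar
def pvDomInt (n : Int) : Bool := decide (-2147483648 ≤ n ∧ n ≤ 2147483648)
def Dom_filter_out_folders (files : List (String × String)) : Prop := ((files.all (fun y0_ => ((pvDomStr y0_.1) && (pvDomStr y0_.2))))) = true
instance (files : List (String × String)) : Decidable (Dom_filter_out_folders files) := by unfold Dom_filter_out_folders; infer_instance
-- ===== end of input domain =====

-- B replaces A's per-key scan of all keys with one pass collecting the set of all directory prefixes; measured faster (asymptotic).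
-- ===== PORT A =====
-- inner for/else loop over list(files.keys()): Python's `file.find(file_to_test + "/") == 0`
def pvStartsFolder (f k : String) : Bool := PySem.Chars.find f.toList (k.toList ++ ['/']) == 0

def filter_out_folders (files : List (String × String)) : List (String × String) :=
  let d := PySem.Dict.ofList files      -- the dict the caller passes (insertion order, last value wins)
  let result := d.items.foldl (fun (result : PySem.Dict String String) kv =>
      if d.keys.any (fun f => pvStartsFolder f kv.1) then result
      else result.insert kv.1 kv.2) PySem.Dict.empty
  result.items

-- ===== PORT B =====
-- inner loop of B: walk the chars of one name, adding each prefix that ends just before a '/'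
def pvAddFolders (s : PySem.Set (List Char)) (pref : List Char) : List Char → PySem.Set (List Char)
  | [] => s
  | c :: t => pvAddFolders (if c = '/' then PySem.Set.add s pref else s) (pref ++ [c]) t

def pvFoldersOf (keys : List String) : PySem.Set (List Char) :=
  keys.foldl (fun s name => pvAddFolders s [] name.toList) PySem.Set.empty

def filter_out_folders_alt (files : List (String × String)) : List (String × String) :=
  let d := PySem.Dict.ofList files      -- the dict the caller passes
  let folders := pvFoldersOf d.keys
  (d.items.foldl (fun (result : PySem.Dict String String) kv =>
      if PySem.Set.contains folders kv.1.toList then result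
      else result.insert kv.1 kv.2) PySem.Dict.empty).items

-- ===== PRECONDITION & SPEC =====
def Spec_filter_out_folders (files : List (String × String)) (out : List (String × String)) : Prop := out = filter_out_folders_alt files
instance (files : List (String × String)) (out : List (String × String)) : Decidable (Spec_filter_out_folders files out) := by unfold Spec_filter_out_folders; infer_instance

-- ===== CLAIM (what is proved, stated in full; the proofs are below) =====
def Claim_equal_filter_out_folders : Prop := ∀ (files : List (String × String)), Dom_filter_out_folders files → Spec_filter_out_folders files (filter_out_folders files)

-- ===== LEMMAS AND PROOFS =====

theorem pv_find_go_lb (sub s : List Char) (k : Nat) :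
    PySem.Chars.find.go sub s k = -1 ∨ (k : Int) ≤ PySem.Chars.find.go sub s k := by
  induction s generalizing k with
  | nil => simp only [PySem.Chars.find.go]; split_ifs <;> simp
  | cons c t ih =>
    simp only [PySem.Chars.find.go]
    split_ifs with h
    · right; exact le_refl _
    · rcases ih (k + 1) with h1 | h1
      · left; exact h1
      · right; omega

theorem pv_find_eq_zero_iff (s sub : List Char) :
    (PySem.Chars.find s sub = 0) ↔ sub <+: s ∨ (sub = [] ∧ s = []) := by
  unfold PySem.Chars.find
  cases s with
  | nil =>
    simp only [PySem.Chars.find.go]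
    split_ifs with h
    · simp_all [List.isEmpty_iff]
    · simp_all [List.isEmpty_iff, List.prefix_nil]
  | cons c t =>
    simp only [PySem.Chars.find.go]
    split_ifs with h
    · simp [List.isPrefixOf_iff_prefix.mp h]
    · constructor
      · intro hz
        rcases pv_find_go_lb sub t (0 + 1) with h1 | h1 <;> omega
      · rintro (hp | ⟨_, hs⟩)
        · exact absurd (List.isPrefixOf_iff_prefix.mpr hp) (by simp [h])
        · cases hs

theorem pv_mem_addFolders (x : List Char) (s : PySem.Set (List Char)) (pref cs : List Char) :
    x ∈ pvAddFolders s pref cs ↔ x ∈ s ∨ ∃ u, x = pref ++ u ∧ (u ++ ['/']) <+: cs := by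
  induction cs generalizing s pref with
  | nil => simp [pvAddFolders]
  | cons c t ih =>
    simp only [pvAddFolders, ih]
    constructor
    · rintro (hs | ⟨u, hx, hp⟩)
      · split_ifs at hs with hc
        · rcases (PySem.Set.mem_add s pref x).mp hs with h | h
          · exact Or.inl h
          · subst hc; exact Or.inr ⟨[], by simpa using h, by simp⟩
        · exact Or.inl hs
      · exact Or.inr ⟨c :: u, by simp [hx], by simpa using List.prefix_cons_inj c |>.mpr (by simpa using hp)⟩
    · rintro (hs | ⟨u, hx, hp⟩)
      · left; split_ifs with hc
        · exact (PySem.Set.mem_add s pref x).mpr (Or.inl hs)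
        · exact hs
      · cases u with
        | nil =>
          simp at hp
          left
          rw [if_pos hp.symm]
          exact (PySem.Set.mem_add s pref x).mpr (Or.inr (by simpa using hx))
        | cons c' u' =>
          obtain ⟨hc, hp'⟩ := List.cons_prefix_cons.mp (by simpa using hp)
          right
          exact ⟨u', by simp [hx, hc], hp'⟩

theorem pv_mem_foldersOf_gen (x : List Char) (keys : List String) (s0 : PySem.Set (List Char)) :
    x ∈ keys.foldl (fun s name => pvAddFolders s [] name.toList) s0 ↔
      x ∈ s0 ∨ ∃ f ∈ keys, (x ++ ['/']) <+: f.toList := by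
  induction keys generalizing s0 with
  | nil => simp
  | cons f t ih =>
    simp only [List.foldl_cons, ih, pv_mem_addFolders, List.mem_cons]
    constructor
    · rintro ((h | ⟨u, hu, hp⟩) | ⟨g, hg, hp⟩)
      · exact Or.inl h
      · exact Or.inr ⟨f, Or.inl rfl, by simpa [hu] using hp⟩
      · exact Or.inr ⟨g, Or.inr hg, hp⟩
    · rintro (h | ⟨g, (rfl | hg), hp⟩)
      · exact Or.inl (Or.inl h)
      · exact Or.inl (Or.inr ⟨x, by simp, hp⟩)
      · exact Or.inr ⟨g, hg, hp⟩

theorem pv_pred_eq (keys : List String) (k : String) :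
    (keys.any (fun f => pvStartsFolder f k)) = PySem.Set.contains (pvFoldersOf keys) k.toList := by
  rw [Bool.eq_iff_iff]
  simp only [List.any_eq_true, pvStartsFolder, beq_iff_eq, pv_find_eq_zero_iff,
    PySem.Set.contains, List.contains_iff_mem, pvFoldersOf, pv_mem_foldersOf_gen]
  constructor
  · rintro ⟨f, hf, hp | ⟨hbad, -⟩⟩
    · exact Or.inr ⟨f, hf, hp⟩
    · simp at hbad
  · rintro (h | ⟨f, hf, hp⟩)
    · simp at h
    · exact ⟨f, hf, Or.inl hp⟩

-- ===== VERDICT (by name: the statement is the Claim_ definition above) =====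
theorem filter_out_folders_spec : Claim_equal_filter_out_folders := by
  intro files _
  unfold Spec_filter_out_folders filter_out_folders filter_out_folders_alt
  simp only []
  congr 1
  congr 1
  funext result kv
  rw [pv_pred_eq]
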